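-- pv_equiv track=rewrite | github.com/Bargal-cmd/Whisper-model- | app.py | remove_repeated_segments
-- ===== SOURCE A (Python) =====
-- def remove_repeated_segments(segments):
--     cleaned = []
--     prev_text = ""
--
--     for seg in segments:
--         text = seg["text"].strip().lower()
--
--         if not text:
--             continue
--
--         if text == prev_text:
--             continue
--
--         if len(text) < 2:
--             continue
--
--         cleaned.append(seg)
--         prev_text = text
--
--     return cleaned
-- ===== SOURCE B (Python) =====
-- def remove_repeated_segments(segments):
--     def key(seg):
--         return seg["text"].strip().lower()
--
--     valid = [seg for seg in segments if len(key(seg)) >= 2]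
--     return valid[:1] + [b for a, b in zip(valid, valid[1:]) if key(a) != key(b)]
-- ===== Notes on version B (the rewrite author's own statement) =====
-- stated objective: alternative
-- what changed: Replaces A's single stateful loop carrying prev_text with a two-pass decomposition: a filter comprehension keeping segments whose normalized text has length >= 2, then an adjacent-duplicate collapse built from zipping the filtered list with its own tail.
import Mathlib
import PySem

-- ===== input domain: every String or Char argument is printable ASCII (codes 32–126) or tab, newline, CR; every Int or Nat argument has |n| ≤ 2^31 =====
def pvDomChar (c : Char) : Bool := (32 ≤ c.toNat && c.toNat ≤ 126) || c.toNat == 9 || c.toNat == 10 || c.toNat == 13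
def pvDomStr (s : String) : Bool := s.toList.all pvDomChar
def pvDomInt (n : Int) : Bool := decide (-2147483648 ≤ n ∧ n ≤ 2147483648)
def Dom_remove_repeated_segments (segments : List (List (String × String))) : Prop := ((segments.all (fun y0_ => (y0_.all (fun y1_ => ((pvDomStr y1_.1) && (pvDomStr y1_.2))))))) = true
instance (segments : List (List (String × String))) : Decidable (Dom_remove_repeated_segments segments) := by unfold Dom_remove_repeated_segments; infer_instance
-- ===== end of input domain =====

-- B replaces A's single stateful loop (prev_text accumulator) by a filter pass plus an
-- adjacent-pair (zip with the tail) deduplication pass; same cost, different decomposition.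

-- seg["text"].strip().lower(); Pre_ guarantees the key is present, so the .getD "" default
-- branch is never taken on admitted inputs (Python raises KeyError exactly there).
def pvKey (seg : List (String × String)) : String :=
  PySem.Str.lower (PySem.Str.strip ((seg.lookup "text").getD ""))

-- ===== PORT A =====
-- the loop body: the four-branch if/continue chain of A, on state (cleaned, prev_text)
def pvStepA (st : List (List (String × String)) × String) (seg : List (String × String)) :
    List (List (String × String)) × String :=
  let text := pvKey seg
  if text = "" then st
  else if text = st.2 then st
  else if PySem.Str.len text < 2 then st
  else (st.1 ++ [seg], text)

def remove_repeated_segments (segments : List (List (String × String))) : List (List (String × String)) :=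
  (segments.foldl pvStepA ([], "")).1

-- ===== PORT B =====
def remove_repeated_segments_alt (segments : List (List (String × String))) : List (List (String × String)) :=
  let valid := segments.filter (fun seg => 2 ≤ PySem.Str.len (pvKey seg))
  PySem.List.slice valid none (some 1) ++
    (valid.zip (PySem.List.slice valid (some 1) none)).filterMap
      (fun p => if pvKey p.1 ≠ pvKey p.2 then some p.2 else none)

-- ===== PRECONDITION & SPEC =====
-- Pre_ excludes exactly the inputs where some segment lacks the "text" key, on which Python A raises KeyError.
def Pre_remove_repeated_segments (segments : List (List (String × String))) : Prop :=
  (segments.all (fun seg => (seg.lookup "text").isSome)) = true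
instance (segments : List (List (String × String))) : Decidable (Pre_remove_repeated_segments segments) := by unfold Pre_remove_repeated_segments; infer_instance

def pvWitness_remove_repeated_segments : (List (List (String × String))) :=
  [[("text", " Ab ")], [("text", "ab"), ("id", "1")], [("text", "x")], [("text", "cd")]]

def Spec_remove_repeated_segments (segments : List (List (String × String))) (out : List (List (String × String))) : Prop := out = remove_repeated_segments_alt segments
instance (segments : List (List (String × String))) (out : List (List (String × String))) : Decidable (Spec_remove_repeated_segments segments out) := by unfold Spec_remove_repeated_segments; infer_instance

-- ===== CLAIM (what is proved, stated in full; the proofs are below) =====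
def Claim_equal_remove_repeated_segments : Prop := ∀ (segments : List (List (String × String))), Dom_remove_repeated_segments segments → Pre_remove_repeated_segments segments → Spec_remove_repeated_segments segments (remove_repeated_segments segments)

-- ===== LEMMAS AND PROOFS =====

-- A's loop as a structural recursion (the accumulator peeled off).
def pvFA (prev : String) : List (List (String × String)) → List (List (String × String))
  | [] => []
  | seg :: rest =>
    let text := pvKey seg
    if text = "" then pvFA prev rest
    else if text = prev then pvFA prev rest
    else if PySem.Str.len text < 2 then pvFA prev rest
    else seg :: pvFA text rest

-- adjacent dedup keyed by pvKey, carrying the previous key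
def pvG (prev : String) : List (List (String × String)) → List (List (String × String))
  | [] => []
  | seg :: rest => if pvKey seg = prev then pvG prev rest else seg :: pvG (pvKey seg) rest

theorem pv_foldl_fst (segs : List (List (String × String)))
    (acc : List (List (String × String))) (prev : String) :
    (segs.foldl pvStepA (acc, prev)).1 = acc ++ pvFA prev segs := by
  induction segs generalizing acc prev with
  | nil => simp only [List.foldl_nil, pvFA, List.append_nil]
  | cons seg rest ih =>
    rw [List.foldl_cons, pvFA]
    by_cases h1 : pvKey seg = ""
    · have hs : pvStepA (acc, prev) seg = (acc, prev) := by
        unfold pvStepA; rw [if_pos h1]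
      rw [hs, if_pos h1, ih]
    · by_cases h2 : pvKey seg = prev
      · have hs : pvStepA (acc, prev) seg = (acc, prev) := by
          unfold pvStepA; rw [if_neg h1, if_pos h2]
        rw [hs, if_neg h1, if_pos h2, ih]
      · by_cases h3 : PySem.Str.len (pvKey seg) < 2
        · have hs : pvStepA (acc, prev) seg = (acc, prev) := by
            unfold pvStepA; rw [if_neg h1, if_neg h2, if_pos h3]
          rw [hs, if_neg h1, if_neg h2, if_pos h3, ih]
        · have hs : pvStepA (acc, prev) seg = (acc ++ [seg], pvKey seg) := by
            unfold pvStepA; rw [if_neg h1, if_neg h2, if_neg h3]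
          rw [hs, if_neg h1, if_neg h2, if_neg h3, ih]
          simp

theorem pv_len_pos_of_ne (t : String) (h : ¬ PySem.Str.len t < 2) : t ≠ "" := by
  intro he; subst he; revert h; decide

theorem pv_fA_eq_g_filter (segs : List (List (String × String))) (prev : String) :
    pvFA prev segs = pvG prev (segs.filter (fun seg => 2 ≤ PySem.Str.len (pvKey seg))) := by
  induction segs generalizing prev with
  | nil => simp only [pvFA, List.filter_nil, pvG]
  | cons seg rest ih =>
    rw [List.filter_cons, pvFA]
    by_cases h3 : PySem.Str.len (pvKey seg) < 2
    · have hf : ¬ (2 ≤ PySem.Str.len (pvKey seg)) := by omega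
      rw [if_neg (fun hc => hf (of_decide_eq_true hc))]
      by_cases h1 : pvKey seg = ""
      · rw [if_pos h1, ih]
      · rw [if_neg h1]
        by_cases h2 : pvKey seg = prev
        · rw [if_pos h2, ih]
        · rw [if_neg h2, if_pos h3, ih]
    · have ht : (2 ≤ PySem.Str.len (pvKey seg)) := by omega
      have h1 : pvKey seg ≠ "" := pv_len_pos_of_ne _ h3
      rw [if_pos (decide_eq_true ht), if_neg h1, pvG]
      by_cases h2 : pvKey seg = prev
      · rw [if_pos h2, if_pos h2, ih]
      · rw [if_neg h2, if_neg h2, if_neg h3, ih]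

theorem pv_zip_filterMap_eq_g (l : List (List (String × String))) (s : List (String × String)) :
    ((s :: l).zip l).filterMap
      (fun p => if pvKey p.1 ≠ pvKey p.2 then some p.2 else none) = pvG (pvKey s) l := by
  induction l generalizing s with
  | nil => simp only [List.zip_nil_right, List.filterMap_nil, pvG]
  | cons b rest ih =>
    rw [List.zip_cons_cons, List.filterMap_cons, pvG]
    by_cases h : pvKey b = pvKey s
    · rw [if_pos h]
      have : (if pvKey s ≠ pvKey b then some b else none) = none := by
        rw [if_neg (by simp [h])]
      rw [this, ← h, ih]
    · rw [if_neg h]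
      have : (if pvKey s ≠ pvKey b then some b else none) = some b := by
        rw [if_pos (fun he => h he.symm)]
      rw [this, ih]

-- ===== VERDICT (by name: the statement is the Claim_ definition above) =====
theorem remove_repeated_segments_spec : Claim_equal_remove_repeated_segments := by
  intro segments _ _
  unfold Spec_remove_repeated_segments remove_repeated_segments remove_repeated_segments_alt
  dsimp only
  rw [pv_foldl_fst, pv_fA_eq_g_filter]
  rw [PySem.List.slice_from_one, PySem.List.slice_to _ (by decide)]
  cases hv : segments.filter (fun seg => 2 ≤ PySem.Str.len (pvKey seg)) with
  | nil => simp only [pvG, List.take_nil, List.zip_nil_left, List.filterMap_nil,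
      List.append_nil]
  | cons s rest =>
    have hs : 2 ≤ PySem.Str.len (pvKey s) := by
      have := List.of_mem_filter (a := s) (l := segments)
        (p := fun seg => decide (2 ≤ PySem.Str.len (pvKey seg)))
        (by rw [hv]; exact List.mem_cons_self ..)
      exact of_decide_eq_true this
    have hne : pvKey s ≠ "" := by
      intro he; rw [he] at hs; revert hs; decide
    rw [pvG, if_neg hne, List.nil_append]
    have h1 : Int.toNat 1 = 1 := rfl
    rw [h1, List.take_succ_cons, List.take_zero, List.tail_cons, pv_zip_filterMap_eq_g]
    simp
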